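-- pv_equiv track=rewrite | github.com/kristaloverbeer/madkudu | src/core/statistics.py | _get_number_of_days_active_last_7_days
-- ===== SOURCE A (Python) =====
-- from typing import Tuple, List
--
-- def _get_number_of_days_active_last_7_days(user_events: List[dict]) -> int:
--     events_timestamps = [
--         timestamp for user_event in user_events for key, timestamp in user_event.items()
--         if key == 'timestamp'
--     ]
--     unique_events_dates = list(set(
--         timestamp[:9] for timestamp in events_timestamps
--     ))
--     return len(unique_events_dates)
-- ===== SOURCE B (Python) =====
-- def _get_number_of_days_active_last_7_days(user_events):
--     dates = []
--     for user_event in user_events: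
--         for key, timestamp in user_event.items():
--             if key == 'timestamp':
--                 dates.append(timestamp[:9])
--     dates.sort()
--     count = 0
--     prev = None
--     for d in dates:
--         if prev is None or d != prev:
--             count += 1
--         prev = d
--     return count
-- ===== Notes on version B (the rewrite author's own statement) =====
-- stated objective: alternative
-- what changed: replaces the hash-set deduplication with a sort-then-linear-scan count of distinct date prefixes (single accumulator pass, no set)
import Mathlib
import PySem

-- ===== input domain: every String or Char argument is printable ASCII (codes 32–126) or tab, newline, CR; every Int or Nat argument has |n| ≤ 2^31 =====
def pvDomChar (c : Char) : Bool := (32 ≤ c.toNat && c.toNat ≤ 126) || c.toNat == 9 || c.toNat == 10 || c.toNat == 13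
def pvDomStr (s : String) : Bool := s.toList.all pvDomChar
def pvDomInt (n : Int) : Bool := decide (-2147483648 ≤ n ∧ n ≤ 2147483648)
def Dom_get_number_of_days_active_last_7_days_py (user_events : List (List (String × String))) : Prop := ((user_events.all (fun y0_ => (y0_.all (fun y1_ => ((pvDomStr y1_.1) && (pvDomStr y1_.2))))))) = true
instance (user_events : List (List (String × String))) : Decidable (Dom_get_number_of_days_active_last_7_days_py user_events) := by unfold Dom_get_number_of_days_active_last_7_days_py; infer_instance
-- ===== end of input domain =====

-- B replaces A's hash-set deduplication by sorting the date prefixes and counting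
-- distinct values in one linear scan (objective: alternative algorithm, same result).

-- ===== PORT A =====
-- A: comprehension collecting values under key 'timestamp', then len(set(prefix[:9])).
def get_number_of_days_active_last_7_days_py (user_events : List (List (String × String))) : Int :=
  let events_timestamps : List String :=
    user_events.flatMap (fun user_event =>
      (user_event.filter (fun kv => kv.1 == "timestamp")).map (fun kv => kv.2))
  let unique_events_dates : PySem.Set String :=
    PySem.Set.ofList (events_timestamps.map (fun t => PySem.Str.slice t none (some 9)))
  (unique_events_dates.length : Int)

-- ===== PORT B =====
-- B helper: the scan 'for d in dates: if prev is None or d != prev: count += 1; prev = d'.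
def pvAltScan : Option String → List String → Int → Int
  | _, [], count => count
  | prev, d :: rest, count =>
      pvAltScan (some d) rest
        (match prev with
         | none => count + 1
         | some p => if d ≠ p then count + 1 else count)

def get_number_of_days_active_last_7_days_py_alt (user_events : List (List (String × String))) : Int :=
  let dates : List String :=
    user_events.foldl (fun acc user_event =>
      user_event.foldl (fun acc kv =>
        if kv.1 == "timestamp" then acc ++ [PySem.Str.slice kv.2 none (some 9)] else acc) acc) []
  let sortedDates := PySem.List.sorted dates (fun x => x) false
  pvAltScan none sortedDates 0

-- ===== PRECONDITION & SPEC =====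
def Spec_get_number_of_days_active_last_7_days_py (user_events : List (List (String × String))) (out : Int) : Prop := out = get_number_of_days_active_last_7_days_py_alt user_events
instance (user_events : List (List (String × String))) (out : Int) : Decidable (Spec_get_number_of_days_active_last_7_days_py user_events out) := by unfold Spec_get_number_of_days_active_last_7_days_py; infer_instance

-- ===== CLAIM (what is proved, stated in full; the proofs are below) =====
def Claim_equal_get_number_of_days_active_last_7_days_py : Prop := ∀ (user_events : List (List (String × String))), Dom_get_number_of_days_active_last_7_days_py user_events → Spec_get_number_of_days_active_last_7_days_py user_events (get_number_of_days_active_last_7_days_py user_events)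

-- ===== LEMMAS AND PROOFS =====

-- The length of set(xs) is the number of distinct elements of xs.
theorem pvSetLen (xs : List String) :
    (PySem.Set.ofList xs).length = xs.toFinset.card := by
  have hnd : (PySem.Set.ofList xs).Nodup := PySem.Set.nodup_ofList xs
  have hfs : (PySem.Set.ofList xs).toFinset = xs.toFinset := by
    ext a; simp [PySem.Set.mem_ofList]
  calc (PySem.Set.ofList xs).length
      = (PySem.Set.ofList xs).toFinset.card := (List.toFinset_card_of_nodup hnd).symm
    _ = xs.toFinset.card := by rw [hfs]

theorem pvCardInsert (d : String) (s : Finset String) :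
    (insert d s).card = 1 + (s.erase d).card := by
  by_cases hd : d ∈ s
  · rw [Finset.insert_eq_self.mpr hd]
    have := Finset.card_erase_of_mem hd
    have hpos : 0 < s.card := Finset.card_pos.mpr ⟨d, hd⟩
    omega
  · rw [Finset.card_insert_of_notMem hd, Finset.erase_eq_of_notMem hd]
    omega

-- The scan with remembered previous element p counts the distinct elements ≠ p,
-- provided the remaining list is sorted and bounded below by p.
theorem pvAltScan_some (ys : List String) : ∀ (p : String) (c : Int),
    (∀ y ∈ ys, p ≤ y) → ys.Pairwise (· ≤ ·) →
    pvAltScan (some p) ys c = c + ((ys.toFinset).erase p).card := by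
  induction ys with
  | nil => intro p c _ _; simp [pvAltScan]
  | cons d rest ih =>
    intro p c hlb hpw
    have hlb' : ∀ y ∈ rest, d ≤ y := fun y hy => (List.pairwise_cons.mp hpw).1 y hy
    have hpw' : rest.Pairwise (· ≤ ·) := (List.pairwise_cons.mp hpw).2
    by_cases hdp : d = p
    · subst hdp
      simp only [pvAltScan, ne_eq, not_true_eq_false, if_false]
      rw [ih d c hlb' hpw']
      congr 2
      simp [List.toFinset_cons, Finset.erase_insert_eq_erase]
    · have hlt : p < d := lt_of_le_of_ne (hlb d (List.mem_cons_self)) (fun h => hdp h.symm)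
      simp only [pvAltScan, ne_eq, hdp, not_false_eq_true, if_true]
      rw [ih d (c + 1) hlb' hpw']
      have hpnot : p ∉ insert d rest.toFinset := by
        simp only [Finset.mem_insert, List.mem_toFinset]
        rintro (h | h)
        · exact absurd h.symm (ne_of_lt hlt).symm
        · exact absurd rfl (ne_of_lt (lt_of_lt_of_le hlt (hlb' p h)))
      rw [List.toFinset_cons, Finset.erase_eq_of_notMem hpnot, pvCardInsert]
      omega

theorem pvAltScan_none (ys : List String) (h : ys.Pairwise (· ≤ ·)) :
    pvAltScan none ys 0 = ys.toFinset.card := by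
  cases ys with
  | nil => simp [pvAltScan]
  | cons d rest =>
    simp only [pvAltScan]
    rw [pvAltScan_some rest d (0 + 1) (fun y hy => (List.pairwise_cons.mp h).1 y hy)
          (List.pairwise_cons.mp h).2]
    rw [List.toFinset_cons, pvCardInsert]
    push_cast
    omega

-- B's inner foldl builds the same list as A's filter-map of one event.
theorem pvInnerFold (ev : List (String × String)) : ∀ (acc : List String),
    ev.foldl (fun acc kv =>
        if kv.1 == "timestamp" then acc ++ [PySem.Str.slice kv.2 none (some 9)] else acc) acc
      = acc ++ ((ev.filter (fun kv => kv.1 == "timestamp")).map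
          (fun kv => kv.2)).map (fun t => PySem.Str.slice t none (some 9)) := by
  induction ev with
  | nil => intro acc; simp
  | cons kv rest ih =>
    intro acc
    rw [List.foldl_cons, List.filter_cons]
    cases h : (kv.1 == "timestamp") with
    | true => rw [if_pos rfl, if_pos rfl, ih]; simp
    | false => rw [if_neg (by simp), if_neg (by simp), ih]

-- B's outer foldl builds the same list as A's flatMap.
theorem pvOuterFold (ues : List (List (String × String))) : ∀ (acc : List String),
    ues.foldl (fun acc user_event =>
        user_event.foldl (fun acc kv =>
          if kv.1 == "timestamp" then acc ++ [PySem.Str.slice kv.2 none (some 9)] else acc) acc) acc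
      = acc ++ (ues.flatMap (fun user_event =>
          (user_event.filter (fun kv => kv.1 == "timestamp")).map (fun kv => kv.2))).map
            (fun t => PySem.Str.slice t none (some 9)) := by
  induction ues with
  | nil => intro acc; simp
  | cons ev rest ih =>
    intro acc
    rw [List.foldl_cons, List.flatMap_cons, pvInnerFold, ih]
    simp [List.map_append, List.append_assoc]

-- The whole B pipeline on an arbitrary date list equals A's set length.
theorem pvMain (xs : List String) :
    ((PySem.Set.ofList xs).length : Int) = pvAltScan none (PySem.List.sorted xs (fun x => x) false) 0 := by
  have hpw : (PySem.List.sorted xs (fun x => x) false).Pairwise (· ≤ ·) := by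
    simpa using PySem.List.sorted_pairwise (xs := xs) (key := fun x => x)
  rw [pvAltScan_none _ hpw, pvSetLen]
  have hperm := PySem.List.sorted_perm xs (fun x => x) false
  have hfs : (PySem.List.sorted xs (fun x => x) false).toFinset = xs.toFinset := by
    ext a; simp [hperm.mem_iff]
  rw [hfs]

-- ===== VERDICT (by name: the statement is the Claim_ definition above) =====
theorem get_number_of_days_active_last_7_days_py_spec : Claim_equal_get_number_of_days_active_last_7_days_py := by
  intro user_events _
  unfold Spec_get_number_of_days_active_last_7_days_py
  unfold get_number_of_days_active_last_7_days_py get_number_of_days_active_last_7_days_py_alt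
  rw [pvOuterFold user_events []]
  simp only [List.nil_append]
  exact pvMain _
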